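-- pv_equiv track=rewrite | github.com/cyruscyliu/Morpheus | tools/llcg/mutators/scan.py | parse_blocks_labels
-- ===== SOURCE A (Python) =====
-- from typing import Dict, List, Optional, Set, Tuple
--
-- def parse_blocks_labels(text: str) -> Set[str]:
--     labels: Set[str] = set()
--     blocks: List[List[str]] = []
--     cur: List[str] = []
--     for ln in text.splitlines():
--         if ln.strip() == "":
--             if cur:
--                 blocks.append(cur)
--                 cur = []
--             continue
--         cur.append(ln)
--     if cur:
--         blocks.append(cur)
--
--     for block in blocks:
--         label = None
--         for ln in block:
--             s = ln.strip()
--             if not s or s.startswith("#"):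
--                 continue
--             if s.startswith("["):
--                 parts = s.split(None, 1)
--                 if len(parts) == 2:
--                     label = parts[1].strip()
--             else:
--                 label = s
--             break
--         if label:
--             labels.add(label)
--     return labels
-- ===== SOURCE B (Python) =====
-- def parse_blocks_labels(text):
--     # Single streaming pass: no intermediate blocks list; a per-block
--     # 'resolved' flag replaces the inner scan-with-break.
--     labels = set()
--     resolved = False
--     for ln in text.splitlines():
--         s = ln.strip()
--         if s == "":
--             resolved = False
--             continue
--         if resolved or s.startswith("#"):
--             continue
--         resolved = True
--         if s.startswith("["):
--             parts = s.split(None, 1)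
--             label = parts[1].strip() if len(parts) == 2 else ""
--         else:
--             label = s
--         if label:
--             labels.add(label)
--     return labels
-- ===== Notes on version B (the rewrite author's own statement) =====
-- stated objective: alternative
-- what changed: Replaced A's two-phase design (build a list of line-blocks, then scan each block for its first label) by a single streaming pass over splitlines() with a per-block boolean flag, so no intermediate blocks list exists.
import Mathlib
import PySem

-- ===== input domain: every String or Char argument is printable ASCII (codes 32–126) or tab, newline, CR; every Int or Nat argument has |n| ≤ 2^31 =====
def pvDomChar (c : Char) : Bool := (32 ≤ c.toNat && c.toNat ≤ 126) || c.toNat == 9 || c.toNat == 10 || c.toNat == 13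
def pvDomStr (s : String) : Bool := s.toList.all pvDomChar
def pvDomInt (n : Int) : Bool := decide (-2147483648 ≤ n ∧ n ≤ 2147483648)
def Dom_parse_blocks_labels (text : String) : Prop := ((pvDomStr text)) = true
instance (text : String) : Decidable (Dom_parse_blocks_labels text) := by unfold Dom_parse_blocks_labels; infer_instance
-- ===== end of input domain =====

-- B replaces A's two-phase blocks-then-scan design by one streaming pass with a
-- per-block boolean flag (objective: alternative decomposition, same cost).

-- ===== PORT A =====
-- first loop of A: split the lines into blank-separated blocks
def pvSplitBlocks : List String → List (List String) → List String → List (List String)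
  | [], blocks, cur => if cur = [] then blocks else blocks ++ [cur]
  | ln :: rest, blocks, cur =>
    if PySem.Str.strip ln = "" then
      if cur = [] then pvSplitBlocks rest blocks []
      else pvSplitBlocks rest (blocks ++ [cur]) []
    else pvSplitBlocks rest blocks (cur ++ [ln])

-- inner loop of A over one block: the value of 'label' at the break / loop end
def pvBlockLabel : List String → Option String
  | [] => none
  | ln :: rest =>
    let s := PySem.Str.strip ln
    if s = "" || PySem.Str.startswith s "#" then pvBlockLabel rest
    else if PySem.Str.startswith s "[" then
      let parts := PySem.Str.split₀Max s 1
      if parts.length = 2 then some (PySem.Str.strip (parts.getD 1 "")) else none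
    else some s

-- A's 'if label: labels.add(label)'
def pvAddLabel (labels : List String) (lbl : Option String) : List String :=
  match lbl with
  | some l => if l ≠ "" then PySem.Set.add labels l else labels
  | none => labels

def parse_blocks_labels (text : String) : List String :=
  (pvSplitBlocks (PySem.Str.splitlines text) [] []).foldl
    (fun labels block => pvAddLabel labels (pvBlockLabel block)) []

-- ===== PORT B =====
-- resolve the current block on non-comment line with stripped content s
def pvResolve (labels : List String) (s : String) : List String :=
  let label :=
    if PySem.Str.startswith s "[" then
      let parts := PySem.Str.split₀Max s 1
      if parts.length = 2 then PySem.Str.strip (parts.getD 1 "") else ""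
    else s
  if label ≠ "" then PySem.Set.add labels label else labels

-- B's single streaming loop over the lines
def pvScan : List String → List String → Bool → List String
  | [], labels, _ => labels
  | ln :: rest, labels, resolved =>
    let s := PySem.Str.strip ln
    if s = "" then pvScan rest labels false
    else if resolved || PySem.Str.startswith s "#" then pvScan rest labels resolved
    else pvScan rest (pvResolve labels s) true

def parse_blocks_labels_alt (text : String) : List String :=
  pvScan (PySem.Str.splitlines text) [] false

-- ===== PRECONDITION & SPEC =====
def Spec_parse_blocks_labels (text : String) (out : List String) : Prop := out = parse_blocks_labels_alt text
instance (text : String) (out : List String) : Decidable (Spec_parse_blocks_labels text out) := by unfold Spec_parse_blocks_labels; infer_instance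

-- ===== CLAIM (what is proved, stated in full; the proofs are below) =====
def Claim_equal_parse_blocks_labels : Prop := ∀ (text : String), Dom_parse_blocks_labels text → Spec_parse_blocks_labels text (parse_blocks_labels text)

-- ===== LEMMAS AND PROOFS =====

-- a line is a pure comment line (nonblank, stripped content starts with '#')
def pvIsComment (ln : String) : Prop :=
  PySem.Str.strip ln ≠ "" ∧ PySem.Str.startswith (PySem.Str.strip ln) "#" = true

-- the label fold of A's second loop, with accumulator
def pvLabelFold (blocks : List (List String)) (L : List String) : List String :=
  blocks.foldl (fun labels block => pvAddLabel labels (pvBlockLabel block)) L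

lemma pvBlockLabel_comments (cur : List String) (h : ∀ ln ∈ cur, pvIsComment ln) (xs : List String) :
    pvBlockLabel (cur ++ xs) = pvBlockLabel xs := by
  induction cur with
  | nil => simp
  | cons ln rest ih =>
    obtain ⟨h1, h2⟩ := h ln (by simp)
    simp only [List.cons_append, pvBlockLabel, h2, Bool.or_true, if_true]
    exact ih (fun l hl => h l (by simp [hl]))

-- main invariant, by joint induction over the remaining lines
lemma pvMain : ∀ (lines : List String) (blocks : List (List String)) (cur L : List String),
    ((∀ ln ∈ cur, pvIsComment ln) →
        pvLabelFold (pvSplitBlocks lines blocks cur) L = pvScan lines (pvLabelFold blocks L) false)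
    ∧ (cur ≠ [] → (∀ xs, pvBlockLabel (cur ++ xs) = pvBlockLabel cur) →
        pvLabelFold (pvSplitBlocks lines blocks cur) L
          = pvScan lines (pvAddLabel (pvLabelFold blocks L) (pvBlockLabel cur)) true) := by
  intro lines
  induction lines with
  | nil =>
    intro blocks cur L
    constructor
    · intro hc
      by_cases hcur : cur = []
      · simp [pvSplitBlocks, hcur, pvScan]
      · have : pvBlockLabel cur = none := by
          have := pvBlockLabel_comments cur hc []
          simpa using this
        simp [pvSplitBlocks, hcur, pvScan, pvLabelFold, this, pvAddLabel]
    · intro hcur _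
      simp [pvSplitBlocks, hcur, pvScan, pvLabelFold]
  | cons ln rest ih =>
    intro blocks cur L
    by_cases hb : PySem.Str.strip ln = ""
    · -- blank line: block boundary
      constructor
      · intro hc
        by_cases hcur : cur = []
        · simp only [pvSplitBlocks, hb, if_true, hcur]
          simpa [pvScan, hb] using (ih blocks [] L).1 (by simp)
        · have hnone : pvBlockLabel cur = none := by
            simpa using pvBlockLabel_comments cur hc []
          simp only [pvSplitBlocks, hb, if_true, hcur, if_false]
          rw [(ih (blocks ++ [cur]) [] L).1 (by simp)]
          simp [pvScan, hb, pvLabelFold, hnone, pvAddLabel]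
      · intro hcur hres
        simp only [pvSplitBlocks, hb, if_true, hcur, if_false]
        rw [(ih (blocks ++ [cur]) [] L).1 (by simp)]
        simp [pvScan, hb, pvLabelFold]
    · -- nonblank line
      by_cases hcm : PySem.Str.startswith (PySem.Str.strip ln) "#" = true
      · -- comment line
        have hcmC : PySem.Chars.startswith (PySem.Chars.strip ln.toList) ['#'] = true := by
          simpa using hcm
        constructor
        · intro hc
          simp only [pvSplitBlocks, hb, if_false]
          rw [(ih blocks (cur ++ [ln]) L).1 (by
            intro l hl
            rcases List.mem_append.1 hl with h | h
            · exact hc l h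
            · simp at h; subst h; exact ⟨hb, hcm⟩)]
          simp [pvScan, hb, hcmC]
        · intro hcur hres
          simp only [pvSplitBlocks, hb, if_false]
          have hres' : ∀ xs, pvBlockLabel ((cur ++ [ln]) ++ xs) = pvBlockLabel (cur ++ [ln]) := by
            intro xs
            rw [List.append_assoc, hres ([ln] ++ xs), ← hres [ln]]
          rw [(ih blocks (cur ++ [ln]) L).2 (by simp) hres']
          rw [show pvBlockLabel (cur ++ [ln]) = pvBlockLabel cur from hres [ln]]
          simp [pvScan, hb, hcmC]
      · -- resolving line
        have hcmC : PySem.Chars.startswith (PySem.Chars.strip ln.toList) ['#'] = false := by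
          simpa using hcm
        have hlnres : ∀ xs, pvBlockLabel (ln :: xs) = pvBlockLabel [ln] := by
          intro xs
          simp [pvBlockLabel, hb, hcmC]
        constructor
        · intro hc
          simp only [pvSplitBlocks, hb, if_false]
          have hres' : ∀ xs, pvBlockLabel ((cur ++ [ln]) ++ xs) = pvBlockLabel (cur ++ [ln]) := by
            intro xs
            rw [List.append_assoc, pvBlockLabel_comments cur hc ([ln] ++ xs),
                pvBlockLabel_comments cur hc [ln]]
            exact hlnres xs
          rw [(ih blocks (cur ++ [ln]) L).2 (by simp) hres']
          rw [show pvBlockLabel (cur ++ [ln]) = pvBlockLabel [ln] from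
            pvBlockLabel_comments cur hc [ln]]
          have hadd : pvAddLabel (pvLabelFold blocks L) (pvBlockLabel [ln])
              = pvResolve (pvLabelFold blocks L) (PySem.Str.strip ln) := by
            by_cases hbr : PySem.Str.startswith (PySem.Str.strip ln) "[" = true
            · have hbrC : PySem.Chars.startswith (PySem.Chars.strip ln.toList) ['['] = true := by
                simpa using hbr
              by_cases hlen : (PySem.Str.split₀Max (PySem.Str.strip ln) 1).length = 2
              · simp [pvBlockLabel, pvResolve, pvAddLabel, hb, hcmC, hbrC, hlen]
              · simp [pvBlockLabel, pvResolve, pvAddLabel, hb, hcmC, hbrC, hlen]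
            · have hbrC : PySem.Chars.startswith (PySem.Chars.strip ln.toList) ['['] = false := by
                simpa using hbr
              simp [pvBlockLabel, pvResolve, pvAddLabel, hb, hcmC, hbrC]
          rw [hadd]
          simp [pvScan, hb, hcmC]
        · intro hcur hres
          simp only [pvSplitBlocks, hb, if_false]
          have hres' : ∀ xs, pvBlockLabel ((cur ++ [ln]) ++ xs) = pvBlockLabel (cur ++ [ln]) := by
            intro xs
            rw [List.append_assoc, hres ([ln] ++ xs), ← hres [ln]]
          rw [(ih blocks (cur ++ [ln]) L).2 (by simp) hres']
          rw [show pvBlockLabel (cur ++ [ln]) = pvBlockLabel cur from hres [ln]]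
          simp [pvScan, hb, hcmC]

-- ===== VERDICT (by name: the statement is the Claim_ definition above) =====
theorem parse_blocks_labels_spec : Claim_equal_parse_blocks_labels := by
  intro text _
  unfold Spec_parse_blocks_labels parse_blocks_labels parse_blocks_labels_alt
  have := (pvMain (PySem.Str.splitlines text) [] [] []).1 (by simp)
  simpa [pvLabelFold] using this
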